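-- pv_equiv track=rewrite | github.com/Sidharth-216/ECommerceAPI | ai_agent/orchestrator.py | _find_cart_item_by_name
-- ===== SOURCE A (Python) =====
-- def _find_cart_item_by_name(cart_items: list, name: str) -> dict:
--     """
--     Fuzzy-match a cart item by product name.
--     Returns the first item whose productName contains all words from `name`.
--     """
--     if not name or not cart_items:
--         return None
--     name_lower = name.lower()
--     # Filter out short/common words
--     words = [w for w in name_lower.split() if len(w) > 2]
--     # Try matching all words
--     for item in cart_items:
--         item_name = (item.get('productName') or item.get('ProductName') or '').lower()
--         if all(w in item_name for w in words):
--             return item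
--     # Fallback: match on first significant word
--     if words:
--         for item in cart_items:
--             item_name = (item.get('productName') or item.get('ProductName') or '').lower()
--             if words[0] in item_name:
--                 return item
--     return None
-- ===== SOURCE B (Python) =====
-- def _find_cart_item_by_name(cart_items: list, name: str) -> dict:
--     """Single pass: return the first item matching all significant words;
--     remember the first item matching the first word as a fallback."""
--     if not name or not cart_items:
--         return None
--     words = [w for w in name.lower().split() if len(w) > 2]
--     fallback = None
--     for item in cart_items:
--         item_name = (item.get('productName') or item.get('ProductName') or '').lower()
--         if all(w in item_name for w in words):
--             return item
--         if words and fallback is None and words[0] in item_name: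
--             fallback = item
--     return fallback
-- ===== Notes on version B (the rewrite author's own statement) =====
-- stated objective: alternative
-- what changed: A's two sequential scans of cart_items (all-words pass, then a first-word fallback pass, each recomputing item_name) are fused into one pass that carries a single fallback candidate, so each item's name is fetched and lowercased once.
import Mathlib
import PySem

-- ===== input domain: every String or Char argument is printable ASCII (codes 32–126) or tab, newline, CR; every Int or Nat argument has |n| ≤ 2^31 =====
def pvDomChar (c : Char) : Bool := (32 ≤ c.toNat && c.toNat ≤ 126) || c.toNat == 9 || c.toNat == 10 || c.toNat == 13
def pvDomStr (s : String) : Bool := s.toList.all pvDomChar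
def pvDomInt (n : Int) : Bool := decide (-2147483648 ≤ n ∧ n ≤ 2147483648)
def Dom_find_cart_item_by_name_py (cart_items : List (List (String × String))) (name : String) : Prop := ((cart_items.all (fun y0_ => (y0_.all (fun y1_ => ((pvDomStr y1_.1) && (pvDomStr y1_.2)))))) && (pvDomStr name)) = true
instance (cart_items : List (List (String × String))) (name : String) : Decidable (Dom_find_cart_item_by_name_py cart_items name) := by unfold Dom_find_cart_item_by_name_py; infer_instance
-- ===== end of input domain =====

-- B fuses A's two scans (all-words, then first-word fallback) into one pass that carries
-- a single fallback candidate, computing each item's lowered name once.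

-- shared helpers (both Pythons compute these identically)
-- Python `x or y` on strings/None: take x if it is a non-empty string
def pvOrStr (o : Option String) (d : String) : String :=
  match o with
  | some s => if s = "" then d else s
  | none => d

-- (item.get('productName') or item.get('ProductName') or '').lower()
def pvItemName (item : List (String × String)) : String :=
  PySem.Str.lower (pvOrStr ((PySem.Dict.mk item).get? "productName")
    (pvOrStr ((PySem.Dict.mk item).get? "ProductName") ""))

-- [w for w in name.lower().split() if len(w) > 2]
def pvWords (name : String) : List String :=
  (PySem.Str.split₀ (PySem.Str.lower name)).filter (fun w => PySem.Str.len w > 2)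

-- ===== PORT A =====
-- first loop: first item whose name contains all words
def pvLoop1 (words : List String) : List (List (String × String)) → Option (List (String × String))
  | [] => none
  | x :: xs =>
    if words.all (fun w => PySem.Str.isIn w (pvItemName x)) then some x else pvLoop1 words xs

-- fallback loop: first item whose name contains w0
def pvLoop2 (w0 : String) : List (List (String × String)) → Option (List (String × String))
  | [] => none
  | x :: xs => if PySem.Str.isIn w0 (pvItemName x) then some x else pvLoop2 w0 xs

def find_cart_item_by_name_py (cart_items : List (List (String × String))) (name : String) : Option (List (String × String)) :=
  if name = "" ∨ cart_items = [] then none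
  else
    let words := pvWords name
    match pvLoop1 words cart_items with
    | some it => some it
    | none =>
      match words with
      | [] => none
      | w0 :: _ => pvLoop2 w0 cart_items

-- ===== PORT B =====
-- single pass with fallback accumulator
def pvLoopB (words : List String) : List (List (String × String)) → Option (List (String × String)) → Option (List (String × String))
  | [], fb => fb
  | x :: xs, fb =>
    let iname := pvItemName x
    if words.all (fun w => PySem.Str.isIn w iname) then some x
    else
      pvLoopB words xs
        (match words, fb with
         | w0 :: _, none => if PySem.Str.isIn w0 iname then some x else none
         | _, _ => fb)

def find_cart_item_by_name_py_alt (cart_items : List (List (String × String))) (name : String) : Option (List (String × String)) :=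
  if name = "" ∨ cart_items = [] then none
  else pvLoopB (pvWords name) cart_items none

-- ===== PRECONDITION & SPEC =====
def Spec_find_cart_item_by_name_py (cart_items : List (List (String × String))) (name : String) (out : Option (List (String × String))) : Prop := out = find_cart_item_by_name_py_alt cart_items name
instance (cart_items : List (List (String × String))) (name : String) (out : Option (List (String × String))) : Decidable (Spec_find_cart_item_by_name_py cart_items name out) := by unfold Spec_find_cart_item_by_name_py; infer_instance

-- ===== CLAIM (what is proved, stated in full; the proofs are below) =====
def Claim_equal_find_cart_item_by_name_py : Prop := ∀ (cart_items : List (List (String × String))) (name : String), Dom_find_cart_item_by_name_py cart_items name → Spec_find_cart_item_by_name_py cart_items name (find_cart_item_by_name_py cart_items name)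

-- ===== LEMMAS AND PROOFS =====

-- the fused loop equals: first all-match, else the incoming fallback, else the first-word scan
theorem pvLoopB_eq (words : List String) (xs : List (List (String × String))) :
    ∀ fb : Option (List (String × String)),
      pvLoopB words xs fb =
        match pvLoop1 words xs with
        | some it => some it
        | none =>
          match fb with
          | some y => some y
          | none =>
            match words with
            | [] => none
            | w0 :: _ => pvLoop2 w0 xs := by
  induction xs with
  | nil =>
    intro fb
    cases fb <;> cases words <;> simp [pvLoopB, pvLoop1, pvLoop2]
  | cons x xs ih =>
    intro fb
    simp only [pvLoopB, pvLoop1]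
    by_cases hall : (words.all fun w => PySem.Str.isIn w (pvItemName x)) = true
    · rw [if_pos hall, if_pos hall]
    · simp only [if_neg hall]
      rw [ih]
      cases words with
      | nil => simp at hall
      | cons w0 ws =>
        cases fb with
        | some y => rfl
        | none =>
          show (match pvLoop1 (w0 :: ws) xs with
            | some it => some it
            | none =>
              match (if PySem.Str.isIn w0 (pvItemName x) = true then some x else none : Option (List (String × String))) with
              | some y => some y
              | none => pvLoop2 w0 xs) =
            match pvLoop1 (w0 :: ws) xs with
            | some it => some it
            | none => pvLoop2 w0 (x :: xs)
          by_cases h0 : PySem.Str.isIn w0 (pvItemName x) = true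
          · rw [if_pos h0, show pvLoop2 w0 (x :: xs) = some x from by
              simp only [pvLoop2, if_pos h0]]
          · rw [if_neg h0, show pvLoop2 w0 (x :: xs) = pvLoop2 w0 xs from by
              simp only [pvLoop2, if_neg h0]]

-- ===== VERDICT (by name: the statement is the Claim_ definition above) =====
theorem find_cart_item_by_name_py_spec : Claim_equal_find_cart_item_by_name_py := by
  intro cart name _
  unfold Spec_find_cart_item_by_name_py find_cart_item_by_name_py find_cart_item_by_name_py_alt
  by_cases h : name = "" ∨ cart = []
  · simp [h]
  · simp only [h, if_false]
    rw [pvLoopB_eq]
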